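-- pv_equiv track=rewrite | github.com/aidenbenner/competitive-programming | contests/wat-fall-2018/B/B.py | isOblong
-- ===== SOURCE A (Python) =====
-- import itertools
--
-- def orderedOb(a,b,c,d):
--     if ordTri(a,b,c) and ordTri(b,c,d) and ordTri(d,a,b) and ordTri(c,d,a):
--         da = dist(a,b)
--         db = dist(b,c)
--         dc = dist(c,d)
--         dd = dist(d,a)
--
--         if da == db and db == dc and dc == dd:
--             return False
--         return True
--     return False
--
--     da = dist(a,b)
--     db = dist(a,c)
--     dc = dist(a,d)
--     dd = dist(a,c)
--
--     # 2 rightmost are first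
--     if a[0] - b[0] != c[0] - d[0]:
--         return False
--     if a[1] - b[1] != c[1] - d[1]:
--         return False
--     return True
--
-- def isOblong(a, b, c, d):
--     mp = {}
--     for x in itertools.permutations([a,b,c,d], 2):
--         if dist(x[0], x[1]) == 0:
--             return False
--
--     for x in itertools.permutations([a,b,c,d], 4):
--         if orderedOb(x[0], x[1], x[2], x[3]):
--             return True
--     return False
--
-- def dist(a,b):
--     dx = a[1] - b[1]
--     dy = a[0] - b[0]
--     return dx * dx + dy * dy
--
-- def ordTri(a,b,c):
--     A = dist(a,b)
--     B = dist(b,c)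
--     C = dist(a,c)
--
--     if A + B == C:
--         return True
-- ===== SOURCE B (Python) =====
-- def isOblong(a, b, c, d):
--     # reject coincident points
--     pts = [a, b, c, d]
--     for i in range(4):
--         for j in range(i + 1, 4):
--             if _d2(pts[i], pts[j]) == 0:
--                 return False
--     # a rectangle = parallelogram (equal midpoints) with equal diagonals;
--     # oblong = adjacent sides of different length; try the 3 diagonal pairings
--     return _rect(a, b, c, d) or _rect(a, c, b, d) or _rect(a, b, d, c)
--
-- def _d2(p, q):
--     dx = p[0] - q[0]
--     dy = p[1] - q[1]
--     return dx * dx + dy * dy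
--
-- def _rect(p, q, r, s):
--     # diagonals (p, r) and (q, s)
--     return (p[0] + r[0] == q[0] + s[0] and p[1] + r[1] == q[1] + s[1]
--             and _d2(p, r) == _d2(q, s) and _d2(p, q) != _d2(q, r))
-- ===== Notes on version B (the rewrite author's own statement) =====
-- stated objective: simpler
-- what changed: A brute-forces all 24 vertex orderings, testing four Pythagorean right-angle conditions per ordering; B tests only the 3 diagonal pairings, each with a direct rectangle criterion (equal midpoints, equal squared diagonals, unequal adjacent sides), after one pass over the 6 point pairs for coincident points.
import Mathlib
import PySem

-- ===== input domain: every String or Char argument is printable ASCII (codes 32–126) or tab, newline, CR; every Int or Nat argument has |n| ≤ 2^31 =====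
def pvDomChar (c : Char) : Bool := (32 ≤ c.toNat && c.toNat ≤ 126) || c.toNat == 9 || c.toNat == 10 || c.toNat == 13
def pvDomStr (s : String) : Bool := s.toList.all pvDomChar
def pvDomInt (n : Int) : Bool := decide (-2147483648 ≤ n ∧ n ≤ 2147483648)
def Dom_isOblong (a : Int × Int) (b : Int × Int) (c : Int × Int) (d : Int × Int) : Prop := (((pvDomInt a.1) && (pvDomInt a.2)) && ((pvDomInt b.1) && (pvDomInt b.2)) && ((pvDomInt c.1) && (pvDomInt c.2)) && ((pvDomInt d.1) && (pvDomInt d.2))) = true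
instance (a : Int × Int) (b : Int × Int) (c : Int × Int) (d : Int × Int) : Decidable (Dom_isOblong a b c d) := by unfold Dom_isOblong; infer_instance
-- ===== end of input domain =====

set_option maxHeartbeats 1000000


-- B replaces A's search over all 24 vertex orderings (testing four Pythagorean right
-- angles per ordering) by three diagonal-pairing checks (equal midpoints + equal
-- diagonals + unequal adjacent sides); objective: simpler.

-- ===== PORT A =====
-- dist(a,b)
def distP (a : Int × Int) (b : Int × Int) : Int :=
  let dx := a.2 - b.2
  let dy := a.1 - b.1
  dx * dx + dy * dy

-- ordTri(a,b,c): returns True iff A+B == C (Python returns None otherwise, which is falsy)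
def ordTri (a : Int × Int) (b : Int × Int) (c : Int × Int) : Bool :=
  let A := distP a b
  let B := distP b c
  let C := distP a c
  A + B == C

-- orderedOb(a,b,c,d) (the code after the first `return` in Python is unreachable)
def orderedOb (a : Int × Int) (b : Int × Int) (c : Int × Int) (d : Int × Int) : Bool :=
  if ordTri a b c && ordTri b c d && ordTri d a b && ordTri c d a then
    let da := distP a b
    let db := distP b c
    let dc := distP c d
    let dd := distP d a
    if da == db && db == dc && dc == dd then false else true
  else false

-- isOblong: itertools.permutations([a,b,c,d], 2) and ([a,b,c,d], 4), unrolled in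
-- itertools' order; `for … if …: return False` / `return True` become List.any.
def isOblong (a : Int × Int) (b : Int × Int) (c : Int × Int) (d : Int × Int) : Bool :=
  if ([(a,b),(a,c),(a,d),(b,a),(b,c),(b,d),(c,a),(c,b),(c,d),(d,a),(d,b),(d,c)].any
        (fun x => distP x.1 x.2 == 0)) then false
  else
    ([(a,b,c,d),(a,b,d,c),(a,c,b,d),(a,c,d,b),(a,d,b,c),(a,d,c,b),
      (b,a,c,d),(b,a,d,c),(b,c,a,d),(b,c,d,a),(b,d,a,c),(b,d,c,a),
      (c,a,b,d),(c,a,d,b),(c,b,a,d),(c,b,d,a),(c,d,a,b),(c,d,b,a),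
      (d,a,b,c),(d,a,c,b),(d,b,a,c),(d,b,c,a),(d,c,a,b),(d,c,b,a)].any
       (fun x => orderedOb x.1 x.2.1 x.2.2.1 x.2.2.2))

-- ===== PORT B =====
-- _d2(p,q)
def d2 (p : Int × Int) (q : Int × Int) : Int :=
  let dx := p.1 - q.1
  let dy := p.2 - q.2
  dx * dx + dy * dy

-- _rect(p,q,r,s): rectangle with diagonals (p,r),(q,s), adjacent sides unequal
def rectB (p : Int × Int) (q : Int × Int) (r : Int × Int) (s : Int × Int) : Bool :=
  p.1 + r.1 == q.1 + s.1 && p.2 + r.2 == q.2 + s.2 && d2 p r == d2 q s && !(d2 p q == d2 q r)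

def isOblong_alt (a : Int × Int) (b : Int × Int) (c : Int × Int) (d : Int × Int) : Bool :=
  let pts : List (Int × Int) := [a, b, c, d]
  if ((List.range 4).any fun i =>
        (List.range' (i+1) (3-i)).any fun j => d2 (pts[i]!) (pts[j]!) == 0) then false
  else rectB a b c d || rectB a c b d || rectB a b d c

-- ===== PRECONDITION & SPEC =====
def Spec_isOblong (a : Int × Int) (b : Int × Int) (c : Int × Int) (d : Int × Int) (out : Bool) : Prop := out = isOblong_alt a b c d
instance (a : Int × Int) (b : Int × Int) (c : Int × Int) (d : Int × Int) (out : Bool) : Decidable (Spec_isOblong a b c d out) := by unfold Spec_isOblong; infer_instance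

-- ===== CLAIM (what is proved, stated in full; the proofs are below) =====
def Claim_equal_isOblong : Prop := ∀ (a : Int × Int) (b : Int × Int) (c : Int × Int) (d : Int × Int), Dom_isOblong a b c d → Spec_isOblong a b c d (isOblong a b c d)

-- ===== LEMMAS AND PROOFS =====

-- Proof sketch: after both duplicate guards are shown equivalent, each of A's 24
-- orderings passes (four Pythagorean right angles, not all sides equal) iff B's
-- diagonal-pairing test passes for that ordering (lemma `key`), and the 24 orderings
-- collapse under the dihedral symmetries of `rectB` to B's three pairings.
lemma sq_sum_zero {x y : Int} (h : x*x + y*y = 0) : x = 0 ∧ y = 0 := by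
  have hx := mul_self_nonneg x
  have hy := mul_self_nonneg y
  have hx0 : x*x = 0 := by linarith
  have hy0 : y*y = 0 := by linarith
  exact ⟨mul_self_eq_zero.mp hx0, mul_self_eq_zero.mp hy0⟩

lemma distP_zero_iff (p q : Int × Int) : distP p q = 0 ↔ p = q := by
  obtain ⟨p1, p2⟩ := p; obtain ⟨q1, q2⟩ := q
  simp only [distP, Prod.mk.injEq]
  constructor
  · intro h
    have h' : (p2-q2)*(p2-q2) + (p1-q1)*(p1-q1) = 0 := by linarith
    obtain ⟨h2, h1⟩ := sq_sum_zero h'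
    exact ⟨by linarith, by linarith⟩
  · rintro ⟨h1, h2⟩; subst h1; subst h2; ring

lemma d2_zero_iff (p q : Int × Int) : d2 p q = 0 ↔ p = q := by
  obtain ⟨p1, p2⟩ := p; obtain ⟨q1, q2⟩ := q
  simp only [d2, Prod.mk.injEq]
  constructor
  · intro h
    constructor <;> nlinarith [sq_nonneg (p1 - q1), sq_nonneg (p2 - q2)]
  · rintro ⟨h1, h2⟩; subst h1; subst h2; ring

lemma guards_eq (a b c d : Int × Int) :
    ([(a,b),(a,c),(a,d),(b,a),(b,c),(b,d),(c,a),(c,b),(c,d),(d,a),(d,b),(d,c)].any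
        (fun x => distP x.1 x.2 == 0))
      = (let pts : List (Int × Int) := [a, b, c, d]
         (List.range 4).any fun i =>
           (List.range' (i+1) (3-i)).any fun j => d2 (pts[i]!) (pts[j]!) == 0) := by
  have h4 : List.range 4 = [0,1,2,3] := by decide
  rw [Bool.eq_iff_iff]
  simp only [h4, List.range', List.any_cons, List.any_nil, Bool.or_eq_true,
    beq_iff_eq, distP_zero_iff, d2_zero_iff, Bool.or_false,]
  norm_num
  constructor
  · rintro (h|h|h|h|h|h|h|h|h|h|h|h) <;> subst h <;> simp
  · rintro ((h|h|h)|(h|h)|h) <;> subst h <;> simp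


-- core lemma: one ordering passes A's four-right-angle test iff B's diagonal-pairing
-- test for that ordering passes (needs two adjacent vertices distinct)
lemma key (p q r s : Int × Int) (hpq : p ≠ q) (hqr : q ≠ r) :
    orderedOb p q r s = rectB p q r s := by
  obtain ⟨p1,p2⟩ := p; obtain ⟨q1,q2⟩ := q; obtain ⟨r1,r2⟩ := r; obtain ⟨s1,s2⟩ := s
  have hO : orderedOb (p1,p2) (q1,q2) (r1,r2) (s1,s2)
      = ((ordTri (p1,p2) (q1,q2) (r1,r2) && ordTri (q1,q2) (r1,r2) (s1,s2)
          && ordTri (s1,s2) (p1,p2) (q1,q2) && ordTri (r1,r2) (s1,s2) (p1,p2))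
         && !(distP (p1,p2) (q1,q2) == distP (q1,q2) (r1,r2)
              && distP (q1,q2) (r1,r2) == distP (r1,r2) (s1,s2)
              && distP (r1,r2) (s1,s2) == distP (s1,s2) (p1,p2))) := by
    simp only [orderedOb]
    split_ifs with h h2 <;> simp_all
    tauto
  rw [Bool.eq_iff_iff, hO]
  simp only [ordTri, distP, rectB, d2, Bool.and_eq_true, beq_iff_eq,
    Bool.not_eq_true', Bool.and_eq_false_iff, beq_eq_false_iff_ne, ne_eq]
  constructor
  · rintro ⟨⟨⟨⟨e1, e2⟩, e3⟩, e4⟩, hne⟩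
    have hpq' : ¬(p1 = q1 ∧ p2 = q2) := by simpa [Prod.ext_iff] using hpq
    have hqr' : ¬(q1 = r1 ∧ q2 = r2) := by simpa [Prod.ext_iff] using hqr
    clear hO hpq hqr
    have huv2 : 2*((q1-p1)*(r1-q1) + (q2-p2)*(r2-q2)) = 0 := by linear_combination -e1
    have huv : (q1-p1)*(r1-q1) + (q2-p2)*(r2-q2) = 0 := by linarith
    have hvw2 : 2*((r1-q1)*(s1-r1) + (r2-q2)*(s2-r2)) = 0 := by linear_combination -e2
    have hvw : (r1-q1)*(s1-r1) + (r2-q2)*(s2-r2) = 0 := by linarith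
    have hzu2 : 2*((p1-s1)*(q1-p1) + (p2-s2)*(q2-p2)) = 0 := by linear_combination -e3
    have hzu : (p1-s1)*(q1-p1) + (p2-s2)*(q2-p2) = 0 := by linarith
    have heg2 : 2*((q1-p1)*(q1-p1)+(q2-p2)*(q2-p2)) = 2*((s1-r1)*(s1-r1)+(s2-r2)*(s2-r2)) := by
      linear_combination e1 - e2 + e3 - e4
    have heg : (q1-p1)*(q1-p1)+(q2-p2)*(q2-p2) = (s1-r1)*(s1-r1)+(s2-r2)*(s2-r2) := by linarith
    have hv2 : (r1-q1)*(r1-q1)+(r2-q2)*(r2-q2) ≠ 0 := by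
      intro h0
      obtain ⟨hx0, hy0⟩ := sq_sum_zero h0
      exact hqr' ⟨by linarith, by linarith⟩
    have hcross : ((r1-q1)*(r1-q1)+(r2-q2)*(r2-q2)) * ((q1-p1)*(s2-r2) - (q2-p2)*(s1-r1)) = 0 := by
      linear_combination ((r1-q1)*(s2-r2) - (r2-q2)*(s1-r1))*huv - ((r1-q1)*(q2-p2) - (r2-q2)*(q1-p1))*hvw
    have hX : (q1-p1)*(s2-r2) - (q2-p2)*(s1-r1) = 0 := by
      rcases mul_eq_zero.mp hcross with h0 | h0
      · exact absurd h0 hv2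
      · exact h0
    have hprod : (((s1-r1)-(q1-p1))*((s1-r1)-(q1-p1)) + ((s2-r2)-(q2-p2))*((s2-r2)-(q2-p2)))
        * (((s1-r1)+(q1-p1))*((s1-r1)+(q1-p1)) + ((s2-r2)+(q2-p2))*((s2-r2)+(q2-p2))) = 0 := by
      linear_combination ((q1-p1)*(q1-p1)+(q2-p2)*(q2-p2) - ((s1-r1)*(s1-r1)+(s2-r2)*(s2-r2)))*heg
        + (4*((q1-p1)*(s2-r2) - (q2-p2)*(s1-r1)))*hX
    rcases mul_eq_zero.mp hprod with hcase | hcase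
    · -- w = u : contradiction with p ≠ q
      obtain ⟨c1, c2⟩ := sq_sum_zero hcase
      have hU2 : 2*((q1-p1)*(q1-p1)+(q2-p2)*(q2-p2)) = 0 := by
        linear_combination -hzu - huv - (q1-p1)*c1 - (q2-p2)*c2
      have hU : (q1-p1)*(q1-p1)+(q2-p2)*(q2-p2) = 0 := by linarith
      obtain ⟨hx0, hy0⟩ := sq_sum_zero hU
      exact absurd ⟨by linarith, by linarith⟩ hpq'
    · -- w = -u : the rectangle facts
      obtain ⟨cc1, cc2⟩ := sq_sum_zero hcase
      have c1 : s1 = r1 - (q1 - p1) := by linarith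
      have c2 : s2 = r2 - (q2 - p2) := by linarith
      subst c1; subst c2
      refine ⟨⟨⟨by linarith, by linarith⟩, by linear_combination 4*huv⟩, ?_⟩
      intro hx
      rcases hne with (h0 | h0) | h0
      · exact h0 (by linear_combination hx)
      · exact h0 (by linear_combination -hx)
      · exact h0 (by linear_combination hx)
  · rintro ⟨⟨⟨h1, h2⟩, h3⟩, h4⟩
    clear hO hpq hqr
    have hs1 : s1 = p1 + r1 - q1 := by linarith
    have hs2 : s2 = p2 + r2 - q2 := by linarith
    subst hs1; subst hs2
    have huv4 : 4*((q1-p1)*(r1-q1) + (q2-p2)*(r2-q2)) = 0 := by linear_combination h3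
    have huv : (q1-p1)*(r1-q1) + (q2-p2)*(r2-q2) = 0 := by linarith
    refine ⟨⟨⟨⟨by linear_combination -2*huv, by linear_combination 2*huv⟩,
      by linear_combination 2*huv⟩, by linear_combination -2*huv⟩, ?_⟩
    exact Or.inl (Or.inl fun hx => h4 (by linear_combination hx))

lemma rect_swap13 (p q r s : Int × Int) : rectB p q r s = rectB r q p s := by
  obtain ⟨p1,p2⟩ := p; obtain ⟨q1,q2⟩ := q; obtain ⟨r1,r2⟩ := r; obtain ⟨s1,s2⟩ := s
  rw [Bool.eq_iff_iff]
  simp only [rectB, d2, Bool.and_eq_true, beq_iff_eq, Bool.not_eq_true',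
    beq_eq_false_iff_ne, ne_eq]
  constructor
  · rintro ⟨⟨⟨h1, h2⟩, h3⟩, h4⟩
    refine ⟨⟨⟨by linarith, by linarith⟩, by linear_combination h3⟩, ?_⟩
    intro hx; exact h4 (by linear_combination -hx)
  · rintro ⟨⟨⟨h1, h2⟩, h3⟩, h4⟩
    refine ⟨⟨⟨by linarith, by linarith⟩, by linear_combination h3⟩, ?_⟩
    intro hx; exact h4 (by linear_combination -hx)

lemma rect_rot (p q r s : Int × Int) : rectB p q r s = rectB q r s p := by
  obtain ⟨p1,p2⟩ := p; obtain ⟨q1,q2⟩ := q; obtain ⟨r1,r2⟩ := r; obtain ⟨s1,s2⟩ := s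
  rw [Bool.eq_iff_iff]
  simp only [rectB, d2, Bool.and_eq_true, beq_iff_eq, Bool.not_eq_true',
    beq_eq_false_iff_ne, ne_eq]
  constructor
  · rintro ⟨⟨⟨h1, h2⟩, h3⟩, h4⟩
    refine ⟨⟨⟨by linarith, by linarith⟩, by linear_combination -h3⟩, ?_⟩
    intro hx
    exact h4 (by linear_combination -hx + (p1-q1-r1+s1)*h1 + (p2-q2-r2+s2)*h2)
  · rintro ⟨⟨⟨h1, h2⟩, h3⟩, h4⟩
    refine ⟨⟨⟨by linarith, by linarith⟩, by linear_combination -h3⟩, ?_⟩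
    intro hx
    exact h4 (by linear_combination -hx - (p1-q1-r1+s1)*h1 - (p2-q2-r2+s2)*h2)
lemma main_eq (a b c d : Int × Int) : isOblong a b c d = isOblong_alt a b c d := by
  simp only [isOblong, isOblong_alt]
  rw [← guards_eq a b c d]
  split_ifs with hg
  · rfl
  · simp only [List.any_cons, List.any_nil, Bool.or_eq_true, beq_iff_eq,
      distP_zero_iff, Bool.or_false] at hg
    push Not at hg
    obtain ⟨n1, n2, n3, _, n4, n5, _, _, n6, _, _, _⟩ := hg
    simp only [List.any_cons, List.any_nil, Bool.or_false]
    rw [key a b c d n1 n4,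
      key a b d c n1 n5,
      key a c b d n2 (Ne.symm n4),
      key a c d b n2 n6,
      key a d b c n3 (Ne.symm n5),
      key a d c b n3 (Ne.symm n6),
      key b a c d (Ne.symm n1) n2,
      key b a d c (Ne.symm n1) n3,
      key b c a d n4 (Ne.symm n2),
      key b c d a n4 n6,
      key b d a c n5 (Ne.symm n3),
      key b d c a n5 (Ne.symm n6),
      key c a b d (Ne.symm n2) n1,
      key c a d b (Ne.symm n2) n3,
      key c b a d (Ne.symm n4) (Ne.symm n1),
      key c b d a (Ne.symm n4) n5,
      key c d a b n6 (Ne.symm n3),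
      key c d b a n6 (Ne.symm n5),
      key d a b c (Ne.symm n3) n1,
      key d a c b (Ne.symm n3) n2,
      key d b a c (Ne.symm n5) (Ne.symm n1),
      key d b c a (Ne.symm n5) n4,
      key d c a b (Ne.symm n6) (Ne.symm n2),
      key d c b a (Ne.symm n6) (Ne.symm n4)]
    have E_acdb : rectB a c d b = rectB a b d c := by rw [rect_rot, rect_rot, rect_swap13]
    have E_adbc : rectB a d b c = rectB a c b d := by rw [rect_rot, rect_rot, rect_swap13]
    have E_adcb : rectB a d c b = rectB a b c d := by rw [rect_rot, rect_rot, rect_swap13]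
    have E_bacd : rectB b a c d = rectB a b d c := by rw [rect_swap13, rect_rot]
    have E_badc : rectB b a d c = rectB a b c d := by rw [rect_swap13, rect_rot]
    have E_bcad : rectB b c a d = rectB a c b d := by rw [rect_swap13]
    have E_bcda : rectB b c d a = rectB a b c d := by rw [rect_rot, rect_rot, rect_rot]
    have E_bdac : rectB b d a c = rectB a c b d := by rw [rect_rot, rect_rot]
    have E_bdca : rectB b d c a = rectB a b d c := by rw [rect_rot, rect_rot, rect_rot]
    have E_cabd : rectB c a b d = rectB a b d c := by rw [rect_rot]
    have E_cadb : rectB c a d b = rectB a c b d := by rw [rect_swap13, rect_rot]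
    have E_cbad : rectB c b a d = rectB a b c d := by rw [rect_swap13]
    have E_cbda : rectB c b d a = rectB a c b d := by rw [rect_rot, rect_rot, rect_rot]
    have E_cdab : rectB c d a b = rectB a b c d := by rw [rect_rot, rect_rot]
    have E_cdba : rectB c d b a = rectB a b d c := by rw [rect_rot, rect_swap13]
    have E_dabc : rectB d a b c = rectB a b c d := by rw [rect_rot]
    have E_dacb : rectB d a c b = rectB a c b d := by rw [rect_rot]
    have E_dbac : rectB d b a c = rectB a b d c := by rw [rect_swap13]
    have E_dbca : rectB d b c a = rectB a c b d := by rw [rect_rot, rect_swap13]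
    have E_dcab : rectB d c a b = rectB a b d c := by rw [rect_rot, rect_rot]
    have E_dcba : rectB d c b a = rectB a b c d := by rw [rect_rot, rect_swap13]
    rw [E_acdb, E_adbc, E_adcb, E_bacd, E_badc, E_bcad, E_bcda, E_bdac, E_bdca, E_cabd, E_cadb, E_cbad, E_cbda, E_cdab, E_cdba, E_dabc, E_dacb, E_dbac, E_dbca, E_dcab, E_dcba]
    generalize rectB a b c d = X
    generalize rectB a c b d = Y
    generalize rectB a b d c = Z
    cases X <;> cases Y <;> cases Z <;> simp

-- ===== VERDICT (by name: the statement is the Claim_ definition above) =====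
theorem isOblong_spec : Claim_equal_isOblong := by
  intro a b c d _
  unfold Spec_isOblong
  exact main_eq a b c d
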